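-- pv_equiv track=rewrite | github.com/cpaetz/chat-bracer-ca | deploy/bracer-bot/bot.py | _parse_machine_info
-- ===== SOURCE A (Python) =====
-- def _parse_machine_info(body: str) -> dict | None:
--     if "**Machine Info**" not in body:
--         return None
--     info = {}
--     for line in body.splitlines():
--         line = line.strip()
--         for key in ("Hostname:", "User:", "Serial:", "IP:", "MAC:", "Version:"):
--             if line.startswith(key):
--                 info[key.rstrip(":").lower()] = line[len(key):].strip()
--     return info if info else None
-- ===== SOURCE B (Python) =====
-- _KEYS = {"Hostname", "User", "Serial", "IP", "MAC", "Version"}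
--
--
-- def _parse_machine_info(body: str) -> dict | None:
--     if "**Machine Info**" not in body:
--         return None
--     info = {}
--     for line in body.splitlines():
--         key, sep, rest = line.strip().partition(":")
--         if sep and key in _KEYS:
--             info[key.lower()] = rest.strip()
--     return info if info else None
-- ===== Notes on version B (the rewrite author's own statement) =====
-- stated objective: idiomatic
-- what changed: Per line, B splits once at the first colon and looks the exact key up in a prebuilt set, instead of A's inner scan that tests each line against the six fixed key prefixes.
import Mathlib
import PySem

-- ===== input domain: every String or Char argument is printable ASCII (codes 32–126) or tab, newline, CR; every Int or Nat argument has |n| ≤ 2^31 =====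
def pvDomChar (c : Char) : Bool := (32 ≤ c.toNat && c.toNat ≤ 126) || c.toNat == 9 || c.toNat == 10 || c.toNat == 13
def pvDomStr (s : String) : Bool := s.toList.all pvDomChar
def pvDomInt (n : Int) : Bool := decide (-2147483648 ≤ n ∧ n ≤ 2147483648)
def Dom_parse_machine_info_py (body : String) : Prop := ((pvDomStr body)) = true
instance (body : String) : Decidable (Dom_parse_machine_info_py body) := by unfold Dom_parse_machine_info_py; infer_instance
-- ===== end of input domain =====

-- B replaces A's per-line scan over six "Key:" prefixes by one partition at the
-- first colon plus an exact-key set lookup (idiomatic; same behaviour).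


-- ===== PORT A =====
-- the literal tuple ("Hostname:", "User:", "Serial:", "IP:", "MAC:", "Version:"), as char lists
def pvKeysA : List (List Char) :=
  [['H','o','s','t','n','a','m','e',':'], ['U','s','e','r',':'], ['S','e','r','i','a','l',':'],
   ['I','P',':'], ['M','A','C',':'], ['V','e','r','s','i','o','n',':']]

-- exact port of Python's s.rstrip(chars): drop trailing chars ∈ chars
def pvRstrip (s chars : List Char) : List Char :=
  (s.reverse.dropWhile (fun c => chars.contains c)).reverse

def pvStepA (info : PySem.Dict String String) (line : String) : PySem.Dict String String :=
  let l := PySem.Chars.strip line.toList                                    -- line = line.strip()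
  pvKeysA.foldl (fun info key =>
    if PySem.Chars.startswith l key then                                    -- line.startswith(key)
      info.insert (String.ofList (PySem.Chars.lower (pvRstrip key [':'])))  -- key.rstrip(":").lower()
        (String.ofList (PySem.Chars.strip (PySem.Chars.slice l (some (key.length : Int)) none)))  -- line[len(key):].strip()
    else info) info

def parse_machine_info_py (body : String) : Option (List (String × String)) :=
  if !(PySem.Str.isIn "**Machine Info**" body) then none
  else
    let info := (PySem.Str.splitlines body).foldl pvStepA PySem.Dict.empty
    if info.items.isEmpty then none else some info.items                    -- info if info else None

-- ===== PORT B =====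
-- the set {'Hostname','User','Serial','IP','MAC','Version'}, as char lists
def pvKeyNames : List (List Char) :=
  [['H','o','s','t','n','a','m','e'], ['U','s','e','r'], ['S','e','r','i','a','l'],
   ['I','P'], ['M','A','C'], ['V','e','r','s','i','o','n']]

-- s.partition(':') : (before, found?, after)
def pvPartitionColon : List Char → List Char × Bool × List Char
  | [] => ([], false, [])
  | c :: cs =>
    if c = ':' then ([], true, cs)
    else
      match pvPartitionColon cs with
      | (k, b, r) => (c :: k, b, r)

def pvStepB (info : PySem.Dict String String) (line : String) : PySem.Dict String String :=
  match pvPartitionColon (PySem.Chars.strip line.toList) with   -- key, sep, rest = line.strip().partition(':')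
  | (k, sep, rest) =>
    if sep && pvKeyNames.contains k then                        -- if sep and key in _KEYS
      info.insert (String.ofList (PySem.Chars.lower k)) (String.ofList (PySem.Chars.strip rest))
    else info

def parse_machine_info_py_alt (body : String) : Option (List (String × String)) :=
  if !(PySem.Str.isIn "**Machine Info**" body) then none
  else
    let info := (PySem.Str.splitlines body).foldl pvStepB PySem.Dict.empty
    if info.items.isEmpty then none else some info.items

-- ===== PRECONDITION & SPEC =====
def Spec_parse_machine_info_py (body : String) (out : Option (List (String × String))) : Prop := out = parse_machine_info_py_alt body
instance (body : String) (out : Option (List (String × String))) : Decidable (Spec_parse_machine_info_py body out) := by unfold Spec_parse_machine_info_py; infer_instance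

-- ===== CLAIM (what is proved, stated in full; the proofs are below) =====
def Claim_equal_parse_machine_info_py : Prop := ∀ (body : String), Dom_parse_machine_info_py body → Spec_parse_machine_info_py body (parse_machine_info_py body)

-- ===== LEMMAS AND PROOFS =====

lemma pvPartition_false : ∀ (cs k r : List Char), pvPartitionColon cs = (k, false, r) → ':' ∉ cs := by
  intro cs
  induction cs with
  | nil => intro k r _; simp
  | cons c cs ih =>
    intro k r h
    by_cases hc : c = ':'
    · subst hc; simp [pvPartitionColon] at h
    · rcases hp : pvPartitionColon cs with ⟨k', b', r'⟩
      simp [pvPartitionColon, hc, hp] at h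
      intro hmem
      rcases List.mem_cons.mp hmem with h1 | h1
      · exact hc h1.symm
      · exact ih k' r' (by rw [hp, h.2.1]) h1

lemma pvPartition_true : ∀ (cs k r : List Char), pvPartitionColon cs = (k, true, r) →
    cs = k ++ ':' :: r ∧ ':' ∉ k := by
  intro cs
  induction cs with
  | nil => intro k r h; simp [pvPartitionColon] at h
  | cons c cs ih =>
    intro k r h
    by_cases hc : c = ':'
    · subst hc
      simp [pvPartitionColon] at h
      obtain ⟨hk, hr⟩ := h
      subst hk; subst hr; simp
    · rcases hp : pvPartitionColon cs with ⟨k', b', r'⟩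
      simp [pvPartitionColon, hc, hp] at h
      obtain ⟨hk, hb, hr⟩ := h
      obtain ⟨h1, h2⟩ := ih k' r' (by rw [hp, hb, hr])
      subst hk
      constructor
      · simp [h1, hr]
      · intro hmem
        rcases List.mem_cons.mp hmem with h1 | h1
        · exact hc h1.symm
        · exact h2 h1

lemma append_colon_inj : ∀ (a b x y : List Char), ':' ∉ a → ':' ∉ b →
    a ++ ':' :: x = b ++ ':' :: y → a = b ∧ x = y := by
  intro a
  induction a with
  | nil =>
    intro b x y _ hb h
    cases b with
    | nil => simpa using h
    | cons c bs =>
      simp at h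
      exact absurd (h.1 ▸ List.mem_cons_self) hb
  | cons c as ih =>
    intro b x y ha hb h
    cases b with
    | nil =>
      simp at h
      exact absurd (h.1 ▸ List.mem_cons_self) ha
    | cons d bs =>
      simp at h ha hb
      obtain ⟨hcd, hrest⟩ := h
      obtain ⟨h1, h2⟩ := ih bs x y ha.2 hb.2 hrest
      simp [hcd, h1, h2]

-- key = kb ++ [':'], ':' ∉ kb, ':' ∉ k: the prefix test is an exact key match
lemma startswith_key (k r kb : List Char) (hk : ':' ∉ k) (hkb : ':' ∉ kb) :
    (kb ++ [':']).isPrefixOf (k ++ ':' :: r) = decide (kb = k) := by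
  by_cases h : kb = k
  · subst h
    have hpre : (kb ++ [':']) <+: (kb ++ ':' :: r) := ⟨r, by simp⟩
    simp [List.isPrefixOf_iff_prefix, hpre]
  · have hnp : ¬ ((kb ++ [':']) <+: (k ++ ':' :: r)) := by
      intro hpre
      obtain ⟨t, ht⟩ := hpre
      have heq : kb ++ ':' :: t = k ++ ':' :: r := by simpa using ht
      exact h (append_colon_inj kb k t r hkb hk heq).1
    rw [decide_eq_false h, Bool.eq_false_iff]
    intro hb
    exact hnp (List.isPrefixOf_iff_prefix.mp hb)

lemma prefix_false (key cs : List Char) (h1 : ':' ∈ key) (h2 : ':' ∉ cs) :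
    key.isPrefixOf cs = false := by
  by_contra h
  have hpre : key <+: cs := List.isPrefixOf_iff_prefix.mp (by simpa using h)
  exact h2 (hpre.subset h1)

lemma slice_from_len (p s : List Char) :
    PySem.Chars.slice (p ++ s) (some (p.length : Int)) none = s := by
  simp [PySem.Chars.slice, PySem.List.slice_from_natCast]

set_option maxHeartbeats 1000000 in
lemma step_eq (info : PySem.Dict String String) (line : String) :
    pvStepA info line = pvStepB info line := by
  unfold pvStepA pvStepB
  generalize PySem.Chars.strip line.toList = cs
  rcases hp : pvPartitionColon cs with ⟨k, b, r⟩
  cases b with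
  | false =>
    have hnc : ':' ∉ cs := pvPartition_false cs k r hp
    simp only [pvKeysA, List.foldl_cons, List.foldl_nil, PySem.Chars.startswith]
    simp only [prefix_false ['H','o','s','t','n','a','m','e',':'] cs (by decide) hnc,
      prefix_false ['U','s','e','r',':'] cs (by decide) hnc,
      prefix_false ['S','e','r','i','a','l',':'] cs (by decide) hnc,
      prefix_false ['I','P',':'] cs (by decide) hnc,
      prefix_false ['M','A','C',':'] cs (by decide) hnc,
      prefix_false ['V','e','r','s','i','o','n',':'] cs (by decide) hnc]
    simp
  | true =>
    obtain ⟨hcs, hk⟩ := pvPartition_true cs k r hp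
    subst hcs
    have e1 := startswith_key k r ['H','o','s','t','n','a','m','e'] hk (by decide)
    have e2 := startswith_key k r ['U','s','e','r'] hk (by decide)
    have e3 := startswith_key k r ['S','e','r','i','a','l'] hk (by decide)
    have e4 := startswith_key k r ['I','P'] hk (by decide)
    have e5 := startswith_key k r ['M','A','C'] hk (by decide)
    have e6 := startswith_key k r ['V','e','r','s','i','o','n'] hk (by decide)
    simp only [List.cons_append, List.nil_append] at e1 e2 e3 e4 e5 e6
    simp only [pvKeysA, List.foldl_cons, List.foldl_nil, PySem.Chars.startswith,
      e1, e2, e3, e4, e5, e6]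
    by_cases h1 : k = ['H','o','s','t','n','a','m','e']
    · subst h1
      have e : (['H','o','s','t','n','a','m','e'] : List Char) ++ ':' :: r = ['H','o','s','t','n','a','m','e',':'] ++ r := rfl
      rw [e, slice_from_len]
      simp [pvKeyNames, pvRstrip, PySem.Chars.lower, PySem.Chars.lowerChar]
    by_cases h2 : k = ['U','s','e','r']
    · subst h2
      have e : (['U','s','e','r'] : List Char) ++ ':' :: r = ['U','s','e','r',':'] ++ r := rfl
      rw [e, slice_from_len]
      simp [pvKeyNames, pvRstrip, PySem.Chars.lower, PySem.Chars.lowerChar]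
    by_cases h3 : k = ['S','e','r','i','a','l']
    · subst h3
      have e : (['S','e','r','i','a','l'] : List Char) ++ ':' :: r = ['S','e','r','i','a','l',':'] ++ r := rfl
      rw [e, slice_from_len]
      simp [pvKeyNames, pvRstrip, PySem.Chars.lower, PySem.Chars.lowerChar]
    by_cases h4 : k = ['I','P']
    · subst h4
      have e : (['I','P'] : List Char) ++ ':' :: r = ['I','P',':'] ++ r := rfl
      rw [e, slice_from_len]
      simp [pvKeyNames, pvRstrip, PySem.Chars.lower, PySem.Chars.lowerChar]
    by_cases h5 : k = ['M','A','C']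
    · subst h5
      have e : (['M','A','C'] : List Char) ++ ':' :: r = ['M','A','C',':'] ++ r := rfl
      rw [e, slice_from_len]
      simp [pvKeyNames, pvRstrip, PySem.Chars.lower, PySem.Chars.lowerChar]
    by_cases h6 : k = ['V','e','r','s','i','o','n']
    · subst h6
      have e : (['V','e','r','s','i','o','n'] : List Char) ++ ':' :: r = ['V','e','r','s','i','o','n',':'] ++ r := rfl
      rw [e, slice_from_len]
      simp [pvKeyNames, pvRstrip, PySem.Chars.lower, PySem.Chars.lowerChar]
    have gm : k ∉ pvKeyNames := by
      simp [pvKeyNames, h1, h2, h3, h4, h5, h6]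
    have g1 : (decide ((['H','o','s','t','n','a','m','e'] : List Char) = k)) = false := decide_eq_false (fun he => h1 he.symm)
    have g2 : (decide ((['U','s','e','r'] : List Char) = k)) = false := decide_eq_false (fun he => h2 he.symm)
    have g3 : (decide ((['S','e','r','i','a','l'] : List Char) = k)) = false := decide_eq_false (fun he => h3 he.symm)
    have g4 : (decide ((['I','P'] : List Char) = k)) = false := decide_eq_false (fun he => h4 he.symm)
    have g5 : (decide ((['M','A','C'] : List Char) = k)) = false := decide_eq_false (fun he => h5 he.symm)
    have g6 : (decide ((['V','e','r','s','i','o','n'] : List Char) = k)) = false := decide_eq_false (fun he => h6 he.symm)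
    simp [g1, g2, g3, g4, g5, g6, gm]

-- ===== VERDICT (by name: the statement is the Claim_ definition above) =====
theorem parse_machine_info_py_spec : Claim_equal_parse_machine_info_py := by
  intro body _
  unfold Spec_parse_machine_info_py parse_machine_info_py parse_machine_info_py_alt
  have hstep : pvStepA = pvStepB := funext fun i => funext fun l => step_eq i l
  rw [hstep]
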